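-- pv_equiv track=rewrite | github.com/Semih1997/CodingBat-Java-Problems-in-Python | Codingbat Java Array-2/Qhas12.py | has12
-- ===== SOURCE A (Python) =====
-- def has12(a):
--     control_2_exist = False
--     if 1 in a:
--         first_place_1 = a.index(1)
--         a = a[first_place_1:]
--         for i in range(len(a)):
--             if a[i] == 2:
--                 control_2_exist = True
--     return control_2_exist
-- ===== SOURCE B (Python) =====
-- def has12(a):
--     seen_one = False
--     for x in a:
--         if x == 1:
--             seen_one = True
--         elif x == 2 and seen_one:
--             return True
--     return False
-- ===== Notes on version B (the rewrite author's own statement) =====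
-- stated objective: simpler
-- what changed: Replaces the membership test + index(1) + slice + separate index-loop with a single early-returning pass that carries a seen_one flag.
import Mathlib
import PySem

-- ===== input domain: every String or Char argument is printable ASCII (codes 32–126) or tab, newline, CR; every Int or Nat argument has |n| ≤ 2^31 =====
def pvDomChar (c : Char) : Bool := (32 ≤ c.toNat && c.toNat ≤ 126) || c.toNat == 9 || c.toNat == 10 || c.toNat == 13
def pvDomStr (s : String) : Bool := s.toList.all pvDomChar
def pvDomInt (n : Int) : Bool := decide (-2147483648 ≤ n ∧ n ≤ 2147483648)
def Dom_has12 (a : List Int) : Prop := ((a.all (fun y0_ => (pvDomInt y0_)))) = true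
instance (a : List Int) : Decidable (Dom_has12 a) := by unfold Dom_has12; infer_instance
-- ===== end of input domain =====

-- B replaces A's membership test + index(1) + slice + separate index loop with one
-- early-returning pass carrying a seen_one flag (objective: simpler).

-- ===== PORT A =====
def has12 (a : List Int) : Bool :=
  -- control_2_exist = False
  let control := false
  if a.contains 1 then
    match PySem.List.index? a 1 with
    | none => control  -- unreachable: guarded by `1 in a`
    | some first_place_1 =>
      let a' := PySem.List.slice a (some (first_place_1 : Int)) none
      (PySem.List.pyRange 0 (a'.length : Int) 1).foldl
        (fun c i => if PySem.List.pyGet? a' i = some 2 then true else c) control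
  else control

-- ===== PORT B =====
def has12Go : List Int → Bool → Bool
  | [], _ => false
  | x :: xs, seen_one =>
    if x = 1 then has12Go xs true
    else if x = 2 ∧ seen_one then true
    else has12Go xs seen_one

def has12_alt (a : List Int) : Bool := has12Go a false

-- ===== PRECONDITION & SPEC =====
def Spec_has12 (a : List Int) (out : Bool) : Prop := out = has12_alt a
instance (a : List Int) (out : Bool) : Decidable (Spec_has12 a out) := by unfold Spec_has12; infer_instance

-- ===== CLAIM (what is proved, stated in full; the proofs are below) =====
def Claim_equal_has12 : Prop := ∀ (a : List Int), Dom_has12 a → Spec_has12 a (has12 a)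

-- ===== LEMMAS AND PROOFS =====

-- A's index loop sets the flag iff some prefix position holds a 2.
theorem has12_loop_eq (a' : List Int) (c : Bool) (n : Nat) (hn : n ≤ a'.length) :
    (PySem.List.pyRange 0 (n : Int) 1).foldl
      (fun c i => if PySem.List.pyGet? a' i = some 2 then true else c) c
    = (c || (a'.take n).contains 2) := by
  induction n generalizing c with
  | zero => simp [PySem.List.pyRange_one_eq_nil]
  | succ m ih =>
    have hm : m ≤ a'.length := Nat.le_of_succ_le hn
    have hcast : ((m + 1 : Nat) : Int) = (m : Int) + 1 := by push_cast; ring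
    rw [hcast, PySem.List.pyRange_one_succ_right (by positivity), List.foldl_append,
      ih c hm]
    have hget : PySem.List.pyGet? a' (m : Int) = some a'[m] := by
      rw [PySem.List.pyGet?_natCast]
      exact List.getElem?_eq_getElem hn
    have htake : a'.take (m + 1) = a'.take m ++ [a'[m]] := by
      exact List.take_succ_eq_append_getElem hn
    simp only [List.foldl_cons, List.foldl_nil, hget, htake, List.contains_append]
    by_cases h2 : a'[m] = 2 <;> simp [h2, eq_comm, Bool.or_comm, Bool.or_assoc]

-- With the flag already set, B just scans for a 2.
theorem has12Go_true (l : List Int) : has12Go l true = l.contains 2 := by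
  induction l with
  | nil => simp [has12Go]
  | cons x xs ih =>
    by_cases h1 : x = 1
    · simp [has12Go, h1, ih]
    · by_cases h2 : x = 2 <;> simp [has12Go, h1, h2, eq_comm, ih]

-- Without a 1 in sight, B never fires.
theorem has12Go_false_of_not_mem (l : List Int) (h : 1 ∉ l) : has12Go l false = false := by
  induction l with
  | nil => rfl
  | cons x xs ih =>
    have hx : x ≠ 1 := fun hx => h (hx ▸ List.mem_cons_self)
    have hxs : 1 ∉ xs := fun hm => h (List.mem_cons_of_mem _ hm)
    simp [has12Go, hx, ih hxs]

-- B skips a 1-free prefix and enters flag mode at the first 1.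
theorem has12Go_prefix (pre suf : List Int) (h : 1 ∉ pre) :
    has12Go (pre ++ 1 :: suf) false = has12Go suf true := by
  induction pre with
  | nil => simp [has12Go]
  | cons x xs ih =>
    have hx : x ≠ 1 := fun hx => h (hx ▸ List.mem_cons_self)
    have hxs : 1 ∉ xs := fun hm => h (List.mem_cons_of_mem _ hm)
    simp only [List.cons_append, has12Go, hx, if_false]
    rw [if_neg (fun hc => hx ?_), ih hxs]
    · exact absurd hc.2 (by simp)

-- ===== VERDICT (by name: the statement is the Claim_ definition above) =====
theorem has12_spec : Claim_equal_has12 := by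
  intro a _
  unfold Spec_has12 has12 has12_alt
  by_cases hmem : (1 : Int) ∈ a
  · have hc : a.contains 1 = true := by simpa using hmem
    simp only [hc, if_true]
    obtain ⟨k, hk⟩ := Option.isSome_iff_exists.mp ((PySem.List.index?_isSome_iff a 1).mpr hmem)
    obtain ⟨pre, suf, ha, hlen, hpre⟩ := (PySem.List.index?_eq_some_iff a 1 k).mp hk
    simp only [hk]
    rw [PySem.List.slice_from_natCast]
    have hdrop : a.drop k = 1 :: suf := by
      subst ha; rw [← hlen, List.drop_left' rfl]
    rw [hdrop, has12_loop_eq _ _ _ le_rfl, List.take_length, ha,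
      has12Go_prefix pre suf hpre, has12Go_true]
    simp
  · have hc : a.contains 1 = false := by simpa using hmem
    simp only [hc]
    exact (has12Go_false_of_not_mem a hmem).symm
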